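-- pv_equiv track=rewrite | github.com/Aditya-3111/invoice_ai_reader | training/ml_field_extractor.py | merge_tokens_by_label
-- ===== SOURCE A (Python) =====
-- from collections import defaultdict
--
-- def merge_tokens_by_label(words, labels):
--     """
--     words = ["Invoice", "No:", "TXN-123"]
--     labels = ["O", "O", "INVOICE_NO"]
--     """
--     grouped = defaultdict(list)
--
--     for w, lab in zip(words, labels):
--         if lab == "O":
--             continue
--         grouped[lab].append(w)
--
--     # merge
--     merged = {}
--     for lab, toks in grouped.items():
--         merged[lab] = " ".join(toks)
--
--     return merged
-- ===== SOURCE B (Python) =====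
-- def merge_tokens_by_label(words, labels):
--     # Staged re-implementation: first compute the distinct non-"O" labels in
--     # first-occurrence order, then build the result with one scan of the pair
--     # list per label (no dict-based grouping at all).
--     pairs = list(zip(words, labels))
--     order = []
--     for _, lab in pairs:
--         if lab != "O" and lab not in order:
--             order.append(lab)
--     return {lab: " ".join(w for w, l in pairs if l == lab) for lab in order}
-- ===== Notes on version B (the rewrite author's own statement) =====
-- stated objective: alternative
-- what changed: Replaces A's dict-of-lists grouping pass plus join pass with a label-directed strategy: compute the distinct non-'O' labels in first-occurrence order, then for each label gather its words by a dedicated scan of the pair list and join them; no grouping dict is maintained.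
import Mathlib
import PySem

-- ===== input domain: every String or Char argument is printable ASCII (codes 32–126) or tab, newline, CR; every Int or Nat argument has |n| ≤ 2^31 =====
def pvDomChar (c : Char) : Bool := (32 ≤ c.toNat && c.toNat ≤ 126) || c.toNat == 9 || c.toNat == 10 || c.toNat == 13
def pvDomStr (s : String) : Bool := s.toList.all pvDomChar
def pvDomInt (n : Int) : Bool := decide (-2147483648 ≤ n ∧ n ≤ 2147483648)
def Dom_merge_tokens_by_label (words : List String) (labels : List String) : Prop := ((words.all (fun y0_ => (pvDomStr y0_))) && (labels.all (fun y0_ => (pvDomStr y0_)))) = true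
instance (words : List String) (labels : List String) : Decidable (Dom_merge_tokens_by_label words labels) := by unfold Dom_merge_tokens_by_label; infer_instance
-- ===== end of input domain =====

-- B replaces A's dict-of-lists grouping + join passes with a label-directed
-- strategy: distinct non-"O" labels in first-occurrence order, then one scan of
-- the pair list per label; objective: alternative (no speed claim).

-- ===== PORT A =====
def merge_tokens_by_label (words : List String) (labels : List String) : List (String × String) :=
  -- grouped = defaultdict(list); for w, lab in zip(words, labels): if lab == "O": continue; grouped[lab].append(w)
  -- merged = {}; for lab, toks in grouped.items(): merged[lab] = " ".join(toks); return merged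
  (((words.zip labels).foldl
      (fun d p => if p.2 == "O" then d else d.modify p.2 [] (fun toks => toks ++ [p.1]))
      (PySem.Dict.empty : PySem.Dict String (List String))).items.foldl
    (fun m p => m.insert p.1 (PySem.Str.join " " p.2))
    (PySem.Dict.empty : PySem.Dict String String)).items

-- ===== PORT B =====
def merge_tokens_by_label_alt (words : List String) (labels : List String) : List (String × String) :=
  -- pairs = list(zip(words, labels))
  -- order = []; for _, lab in pairs: if lab != "O" and lab not in order: order.append(lab)
  -- return {lab: " ".join(w for w, l in pairs if l == lab) for lab in order}
  (((words.zip labels).foldl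
      (fun o p => if p.2 == "O" then o else if o.contains p.2 then o else o ++ [p.2]) []).foldl
    (fun m lab =>
      m.insert lab
        (PySem.Str.join " " (((words.zip labels).filter (fun p => p.2 == lab)).map (fun p => p.1))))
    (PySem.Dict.empty : PySem.Dict String String)).items

-- ===== PRECONDITION & SPEC =====
def Spec_merge_tokens_by_label (words : List String) (labels : List String) (out : List (String × String)) : Prop := out = merge_tokens_by_label_alt words labels
instance (words : List String) (labels : List String) (out : List (String × String)) : Decidable (Spec_merge_tokens_by_label words labels out) := by unfold Spec_merge_tokens_by_label; infer_instance

-- ===== CLAIM (what is proved, stated in full; the proofs are below) =====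
def Claim_equal_merge_tokens_by_label : Prop := ∀ (words : List String) (labels : List String), Dom_merge_tokens_by_label words labels → Spec_merge_tokens_by_label words labels (merge_tokens_by_label words labels)

-- ===== LEMMAS AND PROOFS =====

-- a 'continue on lab == "O"' loop is the loop over the filtered list
theorem pvFoldlSkipO {β : Type} (l : List (String × String)) (f : β → String × String → β)
    (init : β) :
    l.foldl (fun acc p => if p.2 == "O" then acc else f acc p) init
      = (l.filter (fun p => !(p.2 == "O"))).foldl f init := by
  have h : (fun (acc : β) (p : String × String) => if p.2 == "O" then acc else f acc p)
      = fun acc p => if (!(p.2 == "O")) = true then f acc p else acc := by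
    funext acc p; cases p.2 == "O" <;> simp
  rw [h, PySem.List.foldl_if_eq_foldl_filter]

-- B's order list is set(non-O labels) in first-occurrence order
theorem pvOrderEq (L : List (String × String)) :
    L.foldl (fun o p => if o.contains p.2 then o else o ++ [p.2]) []
      = PySem.Set.ofList (L.map (fun p => p.2)) := by
  rw [PySem.Set.ofList_eq_foldl, List.foldl_map]
  rfl

-- A's grouped dict, read at any label, is the filtered word list
theorem pvGroupGetD (L : List (String × String)) (lab : String) :
    (L.foldl (fun d p => d.modify p.2 [] (fun toks => toks ++ [p.1])) PySem.Dict.empty).getD lab []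
      = (L.filter (fun p => p.2 == lab)).map (fun p => p.1) := by
  have h : L.foldl (fun d p => d.modify p.2 [] (fun toks => toks ++ [p.1])) PySem.Dict.empty
      = (L.map Prod.swap).foldl (fun d p => d.modify p.1 [] (fun toks => toks ++ [p.2]))
          PySem.Dict.empty := by
    rw [List.foldl_map]; rfl
  rw [h, PySem.Dict.getD_foldl_modify_append, List.filter_map]
  simp [Function.comp_def, Prod.swap]

-- A's grouped dict has exactly B's order list as its keys
theorem pvGroupKeys (L : List (String × String)) :
    (L.foldl (fun d p => d.modify p.2 [] (fun toks => toks ++ [p.1])) PySem.Dict.empty).keys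
      = PySem.Set.ofList (L.map (fun p => p.2)) := by
  rw [PySem.Dict.keys_foldl_modify_key (key := fun p : String × String => p.2)]
  rw [PySem.Dict.keys_empty, PySem.Set.ofList_eq_foldl]
  rfl

-- ===== VERDICT (by name: the statement is the Claim_ definition above) =====
theorem merge_tokens_by_label_spec : Claim_equal_merge_tokens_by_label := by
  intro words labels _
  unfold Spec_merge_tokens_by_label merge_tokens_by_label merge_tokens_by_label_alt
  set pairs := words.zip labels with hpairs
  set L := pairs.filter (fun p => !(p.2 == "O")) with hL
  -- rewrite both skip-loops to loops over L
  rw [pvFoldlSkipO, pvFoldlSkipO, ← hL, pvOrderEq]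
  set g := L.foldl (fun d p => d.modify p.2 [] (fun toks => toks ++ [p.1])) PySem.Dict.empty
    with hg
  have hkeys : g.keys = PySem.Set.ofList (L.map (fun p => p.2)) := pvGroupKeys L
  have hnd : g.keys.Nodup := by rw [hkeys]; exact PySem.Set.nodup_ofList _
  -- A's second loop over grouped.items inserts fresh distinct keys
  have hndmap : (g.items.map (fun p => p.1)).Nodup := by
    have : g.items.map (fun p => p.1) = g.keys := rfl
    rw [this]; exact hnd
  rw [PySem.Dict.items_foldl_insert_fresh g.items (fun p => p.1)
      (fun p => PySem.Str.join " " p.2) PySem.Dict.empty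
      (fun a _ => PySem.Dict.contains_empty a.1) hndmap]
  -- B's dict comprehension inserts the (nodup) order labels
  rw [PySem.Dict.items_foldl_insert_fresh (PySem.Set.ofList (L.map (fun p => p.2)))
      (fun lab => lab)
      (fun lab => PySem.Str.join " "
        ((pairs.filter (fun p => p.2 == lab)).map (fun p => p.1)))
      PySem.Dict.empty (fun a _ => PySem.Dict.contains_empty a)
      (by simp)]
  -- A's items as a map over its keys
  rw [PySem.Dict.items_eq_map_keys g hnd [], hkeys]
  simp only [List.map_map, Function.comp_def]
  apply List.map_congr_left
  intro lab hmem
  have hlabne : ¬(lab == "O") = true := by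
    have : lab ∈ L.map (fun p => p.2) := (PySem.Set.mem_ofList _ _).mp hmem
    obtain ⟨p, hp, hpe⟩ := List.mem_map.mp this
    have hp' : p ∈ pairs.filter (fun p => !(p.2 == "O")) := hL ▸ hp
    have := List.of_mem_filter hp'
    simpa [hpe] using this
  have hfilt : pairs.filter (fun p => p.2 == lab) = L.filter (fun p => p.2 == lab) := by
    rw [hL, List.filter_filter]
    apply List.filter_congr
    intro p _
    cases h : p.2 == lab
    · simp
    · have : ¬(p.2 == "O") = true := by
        have : p.2 = lab := by simpa using h
        rw [this]; exact hlabne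
      simp [this]
  rw [hfilt, hg, pvGroupGetD]
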